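-- pv_equiv track=rewrite | github.com/mblsha/retrobus-explorer | gateware/reference/spade-projects/sharp-pc-e500-card-spade/experiments/experiment_catalog.py | build_asm_pushu_a_roundtrip_then_popu_imr_a1_chain
-- ===== SOURCE A (Python) =====
-- def build_asm_pushu_a_roundtrip_then_popu_imr_a1_chain(count: int) -> str:
--     lines = [
--         ".ORG 0x10100",
--         "",
--         "start:",
--         "    MV A, 0xA1",
--     ]
--     for _ in range(count):
--         lines.append("    PUSHU A")
--         lines.append("    POPU A")
--         lines.append("    PUSHU A")
--         lines.append("    POPU IMR")
--     lines.append("    RETF")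
--     lines.append("")
--     return "\n".join(lines)
-- ===== SOURCE B (Python) =====
-- def build_asm_pushu_a_roundtrip_then_popu_imr_a1_chain(count: int) -> str:
--     header = ".ORG 0x10100\n\nstart:\n    MV A, 0xA1\n"
--     block = "    PUSHU A\n    POPU A\n    PUSHU A\n    POPU IMR\n"
--     footer = "    RETF\n"
--     return header + block * count + footer
-- ===== Notes on version B (the rewrite author's own statement) =====
-- stated objective: simpler
-- what changed: Replaces the loop that appends the push/pop lines per iteration to a list and then joins, by a closed-form string repetition: constant header + block string * count + constant footer.
import Mathlib
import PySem

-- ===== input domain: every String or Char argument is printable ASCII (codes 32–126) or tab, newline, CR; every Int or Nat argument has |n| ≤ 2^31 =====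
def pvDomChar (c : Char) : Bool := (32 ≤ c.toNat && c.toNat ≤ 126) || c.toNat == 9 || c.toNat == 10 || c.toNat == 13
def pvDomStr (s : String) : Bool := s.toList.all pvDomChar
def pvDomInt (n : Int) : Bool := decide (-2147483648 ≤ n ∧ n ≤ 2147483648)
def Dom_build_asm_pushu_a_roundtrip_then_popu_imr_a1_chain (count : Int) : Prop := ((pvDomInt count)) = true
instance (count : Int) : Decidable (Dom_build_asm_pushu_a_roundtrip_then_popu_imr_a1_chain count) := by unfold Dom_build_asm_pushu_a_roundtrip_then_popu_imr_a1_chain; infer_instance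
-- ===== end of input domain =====

-- B replaces A's per-iteration append loop by a closed-form repetition: header + block * count + footer ("simpler").

-- ===== PORT A =====
def build_asm_pushu_a_roundtrip_then_popu_imr_a1_chain (count : Int) : String :=
  let lines : List String := [".ORG 0x10100", "", "start:", "    MV A, 0xA1"]
  let lines := (PySem.List.pyRange 0 count 1).foldl
    (fun ls _ => (((ls ++ ["    PUSHU A"]) ++ ["    POPU A"]) ++ ["    PUSHU A"]) ++ ["    POPU IMR"]) lines
  let lines := (lines ++ ["    RETF"]) ++ [""]
  PySem.Str.join "\n" lines

-- ===== PORT B =====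
-- port of Python's `block * count` (negative count gives "")
def pvStrMulAux (s : String) : Nat → String
  | 0 => ""
  | n + 1 => s ++ pvStrMulAux s n

def pvStrMul (s : String) (n : Int) : String := pvStrMulAux s n.toNat

def build_asm_pushu_a_roundtrip_then_popu_imr_a1_chain_alt (count : Int) : String :=
  let header := ".ORG 0x10100\n\nstart:\n    MV A, 0xA1\n"
  let block := "    PUSHU A\n    POPU A\n    PUSHU A\n    POPU IMR\n"
  let footer := "    RETF\n"
  header ++ pvStrMul block count ++ footer

-- ===== PRECONDITION & SPEC =====
def Spec_build_asm_pushu_a_roundtrip_then_popu_imr_a1_chain (count : Int) (out : String) : Prop := out = build_asm_pushu_a_roundtrip_then_popu_imr_a1_chain_alt count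
instance (count : Int) (out : String) : Decidable (Spec_build_asm_pushu_a_roundtrip_then_popu_imr_a1_chain count out) := by unfold Spec_build_asm_pushu_a_roundtrip_then_popu_imr_a1_chain; infer_instance

-- ===== CLAIM (what is proved, stated in full; the proofs are below) =====
def Claim_equal_build_asm_pushu_a_roundtrip_then_popu_imr_a1_chain : Prop := ∀ (count : Int), Dom_build_asm_pushu_a_roundtrip_then_popu_imr_a1_chain count → Spec_build_asm_pushu_a_roundtrip_then_popu_imr_a1_chain count (build_asm_pushu_a_roundtrip_then_popu_imr_a1_chain count)

-- ===== LEMMAS AND PROOFS =====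

-- n copies of the 4-line block, as a list of lines
def pvRepLines : Nat → List String
  | 0 => []
  | n + 1 => ["    PUSHU A", "    POPU A", "    PUSHU A", "    POPU IMR"] ++ pvRepLines n

theorem pvFoldl_repLines (l : List Int) (init : List String) :
    l.foldl (fun ls _ => (((ls ++ ["    PUSHU A"]) ++ ["    POPU A"]) ++ ["    PUSHU A"]) ++ ["    POPU IMR"]) init
      = init ++ pvRepLines l.length := by
  induction l generalizing init with
  | nil => simp [pvRepLines]
  | cons x xs ih =>
      rw [List.foldl_cons, ih]
      simp [pvRepLines]

theorem pvJoin_cons_ne_nil (sep x : List Char) (xs : List (List Char)) (h : xs ≠ []) :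
    PySem.Chars.join sep (x :: xs) = x ++ sep ++ PySem.Chars.join sep xs := by
  cases xs with
  | nil => exact absurd rfl h
  | cons y ys => exact PySem.Chars.join_cons_cons sep x y ys

theorem pvRepLines_join (n : Nat) :
    PySem.Chars.join "\n".toList (List.map String.toList (pvRepLines n ++ ["    RETF", ""]))
      = (pvStrMulAux "    PUSHU A\n    POPU A\n    PUSHU A\n    POPU IMR\n" n).toList ++ "    RETF\n".toList := by
  induction n with
  | zero => decide
  | succ n ih =>
      simp only [pvRepLines, List.cons_append, List.nil_append, List.map_cons]
      rw [pvJoin_cons_ne_nil _ _ _ (by simp), pvJoin_cons_ne_nil _ _ _ (by simp),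
          pvJoin_cons_ne_nil _ _ _ (by simp), pvJoin_cons_ne_nil _ _ _ (by simp), ih]
      simp [pvStrMulAux]

theorem pvMain (n : Nat) :
    PySem.Str.join "\n" ((([".ORG 0x10100", "", "start:", "    MV A, 0xA1"] ++ pvRepLines n) ++ ["    RETF"]) ++ [""])
      = ".ORG 0x10100\n\nstart:\n    MV A, 0xA1\n" ++ pvStrMulAux "    PUSHU A\n    POPU A\n    PUSHU A\n    POPU IMR\n" n ++ "    RETF\n" := by
  apply String.ext
  simp only [PySem.Str.toList_join, String.toList_append]
  simp only [List.append_assoc, List.cons_append, List.nil_append, List.map_cons]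
  rw [pvJoin_cons_ne_nil _ _ _ (by simp), pvJoin_cons_ne_nil _ _ _ (by simp),
      pvJoin_cons_ne_nil _ _ _ (by simp), pvJoin_cons_ne_nil _ _ _ (by simp)]
  rw [pvRepLines_join n]
  have hH : (".ORG 0x10100".toList ++ "\n".toList ++ "".toList ++ "\n".toList ++ "start:".toList
      ++ "\n".toList ++ "    MV A, 0xA1".toList ++ "\n".toList)
      = ".ORG 0x10100\n\nstart:\n    MV A, 0xA1\n".toList := by decide
  simp only [← List.append_assoc]
  rw [hH]

-- ===== VERDICT (by name: the statement is the Claim_ definition above) =====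
theorem build_asm_pushu_a_roundtrip_then_popu_imr_a1_chain_spec : Claim_equal_build_asm_pushu_a_roundtrip_then_popu_imr_a1_chain := by
  intro count _
  unfold Spec_build_asm_pushu_a_roundtrip_then_popu_imr_a1_chain
  unfold build_asm_pushu_a_roundtrip_then_popu_imr_a1_chain build_asm_pushu_a_roundtrip_then_popu_imr_a1_chain_alt
  simp only []
  rw [pvFoldl_repLines, PySem.List.length_pyRange_one]
  unfold pvStrMul
  rw [show (count - 0).toNat = count.toNat by omega]
  exact pvMain count.toNat
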